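-- pv_equiv track=rewrite | github.com/strichte/comfyui_export_metadata | export_meta_data_json.py | merge_json_data
-- ===== SOURCE A (Python) =====
-- from collections import OrderedDict
--
-- def merge_json_data(existing_json, new_json):
--     """
--     Merge two JSON objects. The existing JSON data is placed at the top.
--     """
--     merged = OrderedDict()
--
--     # Ensure 'post_training_processing' is at the top
--     if "post_training_processing" in existing_json:
--         merged["post_training_processing"] = existing_json["post_training_processing"]
--     elif "post_training_processing" in new_json:
--         merged["post_training_processing"] = new_json["post_training_processing"]
--
--     # Merge the rest of the data (existing data takes precedence)
--     for key, value in existing_json.items():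
--         if key != "post_training_processing":
--             merged[key] = value
--     for key, value in new_json.items():
--         if key != "post_training_processing" and key not in merged:
--             merged[key] = value
--
--     return merged
-- ===== SOURCE B (Python) =====
-- from collections import OrderedDict
--
-- def merge_json_data(existing_json, new_json):
--     """
--     Merge two JSON objects. The existing JSON data is placed at the top.
--     """
--     merged = OrderedDict(existing_json)
--     for key, value in new_json.items():
--         if key not in merged:
--             merged[key] = value
--     if "post_training_processing" in merged:
--         merged.move_to_end("post_training_processing", last=False)
--     return merged
-- ===== Notes on version B (the rewrite author's own statement) =====
-- stated objective: simpler
-- what changed: B drops the special-key prologue and both inequality guards: it merges existing then new wholesale and restores the ptp-first invariant with a single move_to_end('post_training_processing', last=False) at the end.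
import Mathlib
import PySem

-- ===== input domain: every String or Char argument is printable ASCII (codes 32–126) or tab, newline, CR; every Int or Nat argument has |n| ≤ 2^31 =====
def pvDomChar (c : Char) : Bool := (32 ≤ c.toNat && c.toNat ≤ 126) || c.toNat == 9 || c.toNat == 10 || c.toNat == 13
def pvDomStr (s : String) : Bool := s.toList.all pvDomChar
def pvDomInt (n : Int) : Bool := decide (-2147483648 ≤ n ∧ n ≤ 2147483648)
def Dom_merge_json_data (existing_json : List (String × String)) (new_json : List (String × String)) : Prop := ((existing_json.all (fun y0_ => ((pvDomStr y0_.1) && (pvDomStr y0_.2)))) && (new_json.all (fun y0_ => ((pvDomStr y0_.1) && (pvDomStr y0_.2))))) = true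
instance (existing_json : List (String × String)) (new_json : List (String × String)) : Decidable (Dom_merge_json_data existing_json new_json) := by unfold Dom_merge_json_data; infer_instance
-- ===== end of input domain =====

-- B is a different decomposition of the same merge (no speed claim): plain copy-then-merge, with the
-- 'post_training_processing'-first invariant restored by one move-to-front step at the end.

-- ===== PORT A =====
-- A builds the OrderedDict by a prologue that pre-places 'post_training_processing', then two guarded loops.
def merge_json_data (existing_json : List (String × String)) (new_json : List (String × String)) : List (String × String) :=
  let merged : PySem.Dict String String := PySem.Dict.empty
  -- if "post_training_processing" in existing_json: … elif … in new_json: …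
  let merged :=
    match (PySem.Dict.mk existing_json).get? "post_training_processing" with
    | some v => merged.insert "post_training_processing" v
    | none =>
      match (PySem.Dict.mk new_json).get? "post_training_processing" with
      | some v => merged.insert "post_training_processing" v
      | none => merged
  -- for key, value in existing_json.items(): if key != "post_training_processing": merged[key] = value
  let merged := existing_json.foldl
    (fun m kv => if kv.1 != "post_training_processing" then m.insert kv.1 kv.2 else m) merged
  -- for key, value in new_json.items(): if key != "post_training_processing" and key not in merged: merged[key] = value
  let merged := new_json.foldl
    (fun m kv => if kv.1 != "post_training_processing" && !(m.contains kv.1) then m.insert kv.1 kv.2 else m) merged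
  merged.items

-- ===== PORT B =====
-- merged.move_to_end("post_training_processing", last=False): reinsert the entry at the front.
def pvMoveToFront (d : PySem.Dict String String) (k : String) : PySem.Dict String String :=
  match d.get? k with
  | some v => PySem.Dict.mk ((k, v) :: (d.erase k).items)
  | none => d

def merge_json_data_alt (existing_json : List (String × String)) (new_json : List (String × String)) : List (String × String) :=
  -- merged = OrderedDict(existing_json)
  let merged : PySem.Dict String String := PySem.Dict.mk existing_json
  -- for key, value in new_json.items(): if key not in merged: merged[key] = value
  let merged := new_json.foldl
    (fun m kv => if !(m.contains kv.1) then m.insert kv.1 kv.2 else m) merged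
  -- if "post_training_processing" in merged: merged.move_to_end("post_training_processing", last=False)
  let merged := if merged.contains "post_training_processing" then pvMoveToFront merged "post_training_processing" else merged
  merged.items

-- ===== PRECONDITION & SPEC =====
-- Pre_ excludes association lists with a duplicated key: they do not represent a Python dict
-- (the arguments are dict[str, str], whose keys are necessarily distinct), so A is never run on them.
def Pre_merge_json_data (existing_json : List (String × String)) (new_json : List (String × String)) : Prop :=
  (existing_json.map Prod.fst).Nodup ∧ (new_json.map Prod.fst).Nodup
instance (existing_json : List (String × String)) (new_json : List (String × String)) : Decidable (Pre_merge_json_data existing_json new_json) := by unfold Pre_merge_json_data; infer_instance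
def pvWitness_merge_json_data : (List (String × String)) × (List (String × String)) :=
  ([("post_training_processing", "x"), ("a", "1")], [("a", "2"), ("b", "3")])

def Spec_merge_json_data (existing_json : List (String × String)) (new_json : List (String × String)) (out : List (String × String)) : Prop := out = merge_json_data_alt existing_json new_json
instance (existing_json : List (String × String)) (new_json : List (String × String)) (out : List (String × String)) : Decidable (Spec_merge_json_data existing_json new_json out) := by unfold Spec_merge_json_data; infer_instance

-- ===== CLAIM (what is proved, stated in full; the proofs are below) =====
def Claim_equal_merge_json_data : Prop := ∀ (existing_json : List (String × String)) (new_json : List (String × String)), Dom_merge_json_data existing_json new_json → Pre_merge_json_data existing_json new_json → Spec_merge_json_data existing_json new_json (merge_json_data existing_json new_json)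

-- ===== LEMMAS AND PROOFS =====

theorem itemsA_existing_loop (e : List (String × String)) (d : PySem.Dict String String)
    (hnd : (e.map Prod.fst).Nodup)
    (hfresh : ∀ kv ∈ e, kv.1 ≠ "post_training_processing" → d.contains kv.1 = false) :
    (e.foldl (fun m kv => if kv.1 != "post_training_processing" then m.insert kv.1 kv.2 else m) d).items
      = d.items ++ e.filter (fun kv => kv.1 != "post_training_processing") := by
  induction e generalizing d with
  | nil => simp
  | cons kv e ih =>
    simp only [List.map_cons, List.nodup_cons] at hnd
    simp only [List.foldl_cons, List.filter_cons]
    by_cases h : kv.1 = "post_training_processing"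
    · simp only [h, bne_self_eq_false, if_false, Bool.false_eq_true]
      rw [ih d hnd.2 (fun p hp hne => hfresh p (List.mem_cons_of_mem _ hp) hne)]
    · have hb : (kv.1 != "post_training_processing") = true := by simpa using h
      simp only [hb, if_true]
      have hc : d.contains kv.1 = false := hfresh kv (List.mem_cons_self) h
      rw [ih (d.insert kv.1 kv.2) hnd.2 ?_, PySem.Dict.items_insert_of_not_contains _ _ hc]
      · simp
      · intro p hp hne
        rw [PySem.Dict.contains_insert]
        have : p.1 ≠ kv.1 := by
          intro he; exact hnd.1 (he ▸ (List.mem_map_of_mem hp))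
        simp [this, hfresh p (List.mem_cons_of_mem _ hp) hne]

theorem items_new_loop (p : String × String → Bool) (n : List (String × String)) (d : PySem.Dict String String)
    (hnd : (n.map Prod.fst).Nodup) :
    (n.foldl (fun m kv => if p kv && !(m.contains kv.1) then m.insert kv.1 kv.2 else m) d).items
      = d.items ++ n.filter (fun kv => p kv && !(d.contains kv.1)) := by
  induction n generalizing d with
  | nil => simp
  | cons kv n ih =>
    simp only [List.map_cons, List.nodup_cons] at hnd
    simp only [List.foldl_cons, List.filter_cons]
    by_cases h : (p kv && !(d.contains kv.1)) = true
    · have hc : d.contains kv.1 = false := by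
        rcases Bool.and_eq_true_iff.mp h with ⟨_, h2⟩; simpa using h2
      simp only [h, if_true]
      have hfc : List.filter (fun q => p q && !((d.insert kv.1 kv.2).contains q.1)) n
               = List.filter (fun q => p q && !(d.contains q.1)) n := by
        apply List.filter_congr
        intro q hq
        have hne : (q.1 == kv.1) = false := beq_eq_false_iff_ne.mpr (fun he => hnd.1 (he ▸ List.mem_map_of_mem hq))
        rw [PySem.Dict.contains_insert]
        simp [hne]
      rw [ih (d.insert kv.1 kv.2) hnd.2, PySem.Dict.items_insert_of_not_contains _ _ hc, hfc]
      simp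
    · simp only [h, if_false, Bool.false_eq_true]
      rw [ih d hnd.2]

-- for a key distinct from ptp, any over the ptp-filtered list is any over the list
theorem any_filter_ptp (e : List (String × String)) (k : String) (hk : k ≠ "post_training_processing") :
    (e.filter (fun kv => kv.1 != "post_training_processing")).any (fun p => p.1 == k) = e.any (fun p => p.1 == k) := by
  rw [List.any_filter, Bool.eq_iff_iff]
  simp only [List.any_eq_true]
  constructor
  · rintro ⟨p, hp, h⟩
    exact ⟨p, hp, by simpa using (Bool.and_eq_true_iff.mp h).2⟩
  · rintro ⟨p, hp, h⟩
    refine ⟨p, hp, ?_⟩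
    have : p.1 = k := by simpa using h
    simp [this, hk]

theorem itemsA_new_loop (n : List (String × String)) (d : PySem.Dict String String)
    (hnd : (n.map Prod.fst).Nodup) :
    (n.foldl (fun m kv => if kv.1 != "post_training_processing" && !(m.contains kv.1) then m.insert kv.1 kv.2 else m) d).items
      = d.items ++ n.filter (fun kv => kv.1 != "post_training_processing" && !(d.contains kv.1)) :=
  items_new_loop (fun kv => kv.1 != "post_training_processing") n d hnd

theorem itemsB_new_loop (n : List (String × String)) (d : PySem.Dict String String)
    (hnd : (n.map Prod.fst).Nodup) :
    (n.foldl (fun m kv => if !(m.contains kv.1) then m.insert kv.1 kv.2 else m) d).items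
      = d.items ++ n.filter (fun kv => !(d.contains kv.1)) :=
  items_new_loop (fun _ => true) n d hnd

theorem merge_eq (e n : List (String × String))
    (he : (e.map Prod.fst).Nodup) (hn : (n.map Prod.fst).Nodup) :
    merge_json_data e n = merge_json_data_alt e n := by
  unfold merge_json_data merge_json_data_alt
  dsimp only
  have hcont : ∀ (d : PySem.Dict String String) (k : String),
      d.contains k = d.items.any (fun p => p.1 == k) := fun _ _ => rfl
  have hgetd : ∀ (d : PySem.Dict String String) (k : String),
      d.get? k = (d.items.find? (fun p => p.1 == k)).map (fun p => p.2) := fun _ _ => rfl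
  have herase : ∀ (d : PySem.Dict String String) (k : String),
      (d.erase k).items = d.items.filter (fun p => !(p.1 == k)) := fun _ _ => rfl
  have hmk : ∀ (l : List (String × String)), (PySem.Dict.mk l).items = l := fun _ => rfl
  have hB1 := itemsB_new_loop n (PySem.Dict.mk e) hn
  rw [hmk] at hB1
  rcases hfe : (PySem.Dict.mk e).get? "post_training_processing" with _ | v
  · -- no ptp key in e
    have hfen : e.find? (fun p => p.1 == "post_training_processing") = none := by
      rw [hgetd, hmk] at hfe
      exact Option.map_eq_none_iff.mp hfe
    have heptp : ∀ p ∈ e, (p.1 == "post_training_processing") = false := by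
      intro p hp
      have := List.find?_eq_none.mp hfen p hp
      simpa using this
    have heany' : e.any (fun p => p.1 == "post_training_processing") = false := by
      rw [List.any_eq_false]
      intro p hp
      simp [heptp p hp]
    have hfilterE : e.filter (fun kv => kv.1 != "post_training_processing") = e :=
      List.filter_eq_self.mpr (fun a ha => by simp [bne, heptp a ha])
    have hfilterE' : e.filter (fun p => !(p.1 == "post_training_processing")) = e :=
      List.filter_eq_self.mpr (fun a ha => by simp [heptp a ha])
    have hfresh0 : ∀ kv ∈ e, kv.1 ≠ "post_training_processing" →
        (PySem.Dict.empty : PySem.Dict String String).contains kv.1 = false := by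
      intro kv _ _; rfl
    rcases hfn : (PySem.Dict.mk n).get? "post_training_processing" with _ | w
    · -- ptp nowhere
      dsimp only
      have hnptp : ∀ p ∈ n, (p.1 == "post_training_processing") = false := by
        rw [hgetd, hmk] at hfn
        intro p hp
        have := List.find?_eq_none.mp (Option.map_eq_none_iff.mp hfn) p hp
        simpa using this
      have hA1 := itemsA_existing_loop e PySem.Dict.empty he hfresh0
      rw [hfilterE] at hA1
      simp only [show (PySem.Dict.empty : PySem.Dict String String).items = [] from rfl, List.nil_append] at hA1
      rw [itemsA_new_loop n _ hn, hA1]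
      have hBc : (n.foldl (fun m kv => if !(m.contains kv.1) then m.insert kv.1 kv.2 else m)
          (PySem.Dict.mk e)).contains "post_training_processing" = false := by
        rw [hcont, hB1]
        simp only [List.any_append, List.any_filter, heany', Bool.false_or]
        rw [List.any_eq_false]
        intro p hp
        simp [hnptp p hp]
      rw [if_neg (by rw [hBc]; exact Bool.false_ne_true)]
      rw [hB1, hmk]
      congr 1
      apply List.filter_congr
      intro kv hkv
      rw [hcont, hA1, hcont, hmk]
      have hb : (kv.1 != "post_training_processing") = true := by simp [bne, hnptp kv hkv]
      rw [hb, Bool.true_and]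
    · -- ptp in n only
      dsimp only
      obtain ⟨pr, hpr, hprv⟩ : ∃ pr, n.find? (fun p => p.1 == "post_training_processing") = some pr ∧ pr.2 = w := by
        rw [hgetd, hmk] at hfn
        rcases hf : n.find? (fun p => p.1 == "post_training_processing") with _ | pr
        · rw [hf] at hfn; simp at hfn
        · rw [hf] at hfn; exact ⟨pr, hf, by simpa using hfn⟩
      have hpr1 : (pr.1 == "post_training_processing") = true := by
        have := List.find?_some hpr; simpa using this
      have hprmem : pr ∈ n := List.mem_of_find?_eq_some hpr
      have hd0 : ((PySem.Dict.empty : PySem.Dict String String).insert "post_training_processing" w).items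
          = [("post_training_processing", w)] := rfl
      have hfresh : ∀ kv ∈ e, kv.1 ≠ "post_training_processing" →
          (PySem.Dict.empty.insert "post_training_processing" w).contains kv.1 = false := by
        intro kv _ hk
        rw [hcont, hd0]
        have : ("post_training_processing" == kv.1) = false := beq_eq_false_iff_ne.mpr (Ne.symm hk)
        simp [this]
      have hA1 := itemsA_existing_loop e _ he hfresh
      rw [hd0, hfilterE] at hA1
      rw [itemsA_new_loop n _ hn, hA1]
      have hBc : (n.foldl (fun m kv => if !(m.contains kv.1) then m.insert kv.1 kv.2 else m)
          (PySem.Dict.mk e)).contains "post_training_processing" = true := by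
        rw [hcont, hB1]
        simp only [List.any_append, List.any_filter, heany', Bool.false_or]
        rw [List.any_eq_true]
        refine ⟨pr, hprmem, ?_⟩
        have : pr.1 = "post_training_processing" := eq_of_beq hpr1
        simp [hcont, this, heany']
      rw [if_pos hBc]
      unfold pvMoveToFront
      have hget : (n.foldl (fun m kv => if !(m.contains kv.1) then m.insert kv.1 kv.2 else m)
          (PySem.Dict.mk e)).get? "post_training_processing" = some w := by
        rw [hgetd, hB1, List.find?_append, hmk, hfen, List.find?_filter]
        have hpredeq : (fun a : String × String => decide ((!(PySem.Dict.mk e).contains a.1) = true ∧ (a.1 == "post_training_processing") = true))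
            = (fun p : String × String => p.1 == "post_training_processing") := by
          funext a
          by_cases ha : (a.1 == "post_training_processing") = true
          · have ha' : a.1 = "post_training_processing" := eq_of_beq ha
            simp [hcont, ha', heany']
          · simp [ha]
        rw [hpredeq, hpr]
        simp [hprv]
      rw [hget]
      dsimp only
      rw [hmk, herase, hB1, List.filter_append, List.filter_filter, hmk, hfilterE']
      simp only [hcont, hA1]
      simp only [List.any_append, List.any_cons, List.any_nil, List.cons_append]
      congr 1
      congr 1
      apply List.filter_congr
      intro kv _
      by_cases hk : kv.1 = "post_training_processing"
      · have : ("post_training_processing" == kv.1) = true := beq_of_eq hk.symm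
        simp [hk, bne]
      · have h2 : ("post_training_processing" == kv.1) = false := beq_eq_false_iff_ne.mpr (Ne.symm hk)
        simp [h2, bne]
  · dsimp only
    -- ptp is a key of e, with first value v
    obtain ⟨pr, hpr, hprv⟩ : ∃ pr, e.find? (fun p => p.1 == "post_training_processing") = some pr ∧ pr.2 = v := by
      rw [hgetd, hmk] at hfe
      rcases hf : e.find? (fun p => p.1 == "post_training_processing") with _ | pr
      · rw [hf] at hfe; simp at hfe
      · rw [hf] at hfe; exact ⟨pr, hf, by simpa using hfe⟩
    have heany : e.any (fun p => p.1 == "post_training_processing") = true := by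
      rw [← List.isSome_find?, hpr]; rfl
    have hd0 : (PySem.Dict.empty.insert "post_training_processing" v).items
        = [("post_training_processing", v)] := rfl
    have hfresh : ∀ kv ∈ e, kv.1 ≠ "post_training_processing" →
        (PySem.Dict.empty.insert "post_training_processing" v).contains kv.1 = false := by
      intro kv _ hk
      rw [hcont, hd0]
      have : ("post_training_processing" == kv.1) = false := beq_eq_false_iff_ne.mpr (Ne.symm hk)
      simp [this]
    have hA1 := itemsA_existing_loop e _ he hfresh
    rw [hd0] at hA1
    rw [itemsA_new_loop n _ hn, hA1]
    -- B side
    have hBc : (n.foldl (fun m kv => if !(m.contains kv.1) then m.insert kv.1 kv.2 else m)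
        (PySem.Dict.mk e)).contains "post_training_processing" = true := by
      rw [hcont, hB1]
      simp [List.any_append, heany]
    rw [if_pos hBc]
    unfold pvMoveToFront
    have hget : (n.foldl (fun m kv => if !(m.contains kv.1) then m.insert kv.1 kv.2 else m)
        (PySem.Dict.mk e)).get? "post_training_processing" = some v := by
      rw [hgetd, hB1, List.find?_append, hpr]
      simp [hprv]
    rw [hget]
    dsimp only
    rw [hmk, herase, hB1, List.filter_append]
    -- reduce A's remaining contains over the e-loop dict
    simp only [hcont, hA1]
    rw [List.filter_filter]
    have hbnefun : (fun p : String × String => !(p.1 == "post_training_processing"))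
        = (fun kv : String × String => kv.1 != "post_training_processing") := rfl
    rw [hbnefun]
    simp only [List.any_append, List.any_cons, List.any_nil,
      List.cons_append]
    congr 1
    congr 1
    apply List.filter_congr
    intro kv _
    by_cases hk : kv.1 = "post_training_processing"
    · simp [hk]
    · have h2 : ("post_training_processing" == kv.1) = false := beq_eq_false_iff_ne.mpr (Ne.symm hk)
      have h3 : (e.any fun a => (!(a.1 == "post_training_processing") && a.1 == kv.1)) = e.any (fun p => p.1 == kv.1) := by
        have h4 := any_filter_ptp e kv.1 hk
        rw [List.any_filter] at h4
        simpa [bne] using h4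
      simp [h2, bne, h3]

-- ===== VERDICT (by name: the statement is the Claim_ definition above) =====
theorem merge_json_data_spec : Claim_equal_merge_json_data := by
  intro existing_json new_json _ hpre
  unfold Spec_merge_json_data
  exact merge_eq existing_json new_json hpre.1 hpre.2
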